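-- pv_equiv track=rewrite | github.com/aaronberliner/GenomeCarver | cyborg/carveNode.py | trimRight
-- ===== SOURCE A (Python) =====
-- def trimRight(feature,restrictions):
-- 	end = feature[3]
-- 	for r in restrictions:
-- 		if end >= r[2]:
-- 			end = r[2]-1
-- 	if end < feature[2]:
-- 		end = feature[2]
-- 	return (feature[0],feature[1],feature[2],end,feature[4])
-- ===== SOURCE B (Python) =====
-- def trimRight(feature, restrictions):
--     lo, hi = feature[2], feature[3]
--     order = sorted(restrictions, key=lambda r: r[2])
--     if order:
--         cut = order[0][2] - 1
--         if cut < hi: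
--             hi = cut
--     if hi < lo:
--         hi = lo
--     return (feature[0], feature[1], lo, hi, feature[4])
-- ===== Notes on version B (the rewrite author's own statement) =====
-- stated objective: alternative
-- what changed: Instead of folding a conditional running value over all restrictions, B sorts the restrictions by their boundary, reads only the first (smallest) boundary, and clamps it between feature[2] and feature[3] with explicit branches.
import Mathlib
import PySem

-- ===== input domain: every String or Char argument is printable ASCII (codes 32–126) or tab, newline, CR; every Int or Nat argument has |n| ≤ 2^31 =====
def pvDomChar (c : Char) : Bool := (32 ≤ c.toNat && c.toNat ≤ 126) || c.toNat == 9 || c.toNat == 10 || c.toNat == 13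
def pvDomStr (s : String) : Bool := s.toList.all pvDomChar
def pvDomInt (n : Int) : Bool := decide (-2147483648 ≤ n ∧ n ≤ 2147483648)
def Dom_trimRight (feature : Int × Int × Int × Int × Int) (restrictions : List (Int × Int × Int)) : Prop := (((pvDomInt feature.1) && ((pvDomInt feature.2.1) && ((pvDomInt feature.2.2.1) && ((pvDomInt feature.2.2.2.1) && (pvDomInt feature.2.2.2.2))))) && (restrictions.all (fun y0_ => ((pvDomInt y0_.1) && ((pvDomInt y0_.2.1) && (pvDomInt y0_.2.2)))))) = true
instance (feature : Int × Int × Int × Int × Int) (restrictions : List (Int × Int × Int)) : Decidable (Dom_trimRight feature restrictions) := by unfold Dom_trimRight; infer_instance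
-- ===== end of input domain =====

-- ===== PORT A =====
-- B sorts restrictions by boundary and clamps the smallest boundary with explicit branches (alternative decomposition).
def trimRight (feature : Int × Int × Int × Int × Int) (restrictions : List (Int × Int × Int)) : Int × Int × Int × Int × Int :=
  let e0 := restrictions.foldl (fun e r => if e ≥ r.2.2 then r.2.2 - 1 else e) feature.2.2.2.1
  let e1 := if e0 < feature.2.2.1 then feature.2.2.1 else e0
  (feature.1, feature.2.1, feature.2.2.1, e1, feature.2.2.2.2)

-- ===== PORT B =====
def trimRight_alt (feature : Int × Int × Int × Int × Int) (restrictions : List (Int × Int × Int)) : Int × Int × Int × Int × Int :=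
  let lo := feature.2.2.1
  let hi := feature.2.2.2.1
  let order := PySem.List.sorted restrictions (fun r => r.2.2) false
  let hi' :=
    match order with
    | [] => hi
    | m :: _ =>
        let cut := m.2.2 - 1
        if cut < hi then cut else hi
  let hi'' := if hi' < lo then lo else hi'
  (feature.1, feature.2.1, lo, hi'', feature.2.2.2.2)

-- ===== PRECONDITION & SPEC =====
def Spec_trimRight (feature : Int × Int × Int × Int × Int) (restrictions : List (Int × Int × Int)) (out : Int × Int × Int × Int × Int) : Prop := out = trimRight_alt feature restrictions
instance (feature : Int × Int × Int × Int × Int) (restrictions : List (Int × Int × Int)) (out : Int × Int × Int × Int × Int) : Decidable (Spec_trimRight feature restrictions out) := by unfold Spec_trimRight; infer_instance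

-- ===== CLAIM =====
def Claim_equal_trimRight : Prop := ∀ (feature : Int × Int × Int × Int × Int) (restrictions : List (Int × Int × Int)), Dom_trimRight feature restrictions → Spec_trimRight feature restrictions (trimRight feature restrictions)

-- ===== LEMMAS AND PROOFS =====

-- A's conditional-update fold never exceeds its starting value.
theorem trA_fold_le_init (rs : List (Int × Int × Int)) (a : Int) :
    rs.foldl (fun e r => if e ≥ r.2.2 then r.2.2 - 1 else e) a ≤ a := by
  induction rs generalizing a with
  | nil => simp
  | cons r rs ih =>
      simp only [List.foldl_cons]
      have h := ih (if a ≥ r.2.2 then r.2.2 - 1 else a)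
      by_cases hc : a ≥ r.2.2
      · simp only [if_pos hc] at h ⊢; omega
      · simp only [if_neg hc] at h ⊢; omega

-- A's fold result is below every restriction boundary minus one.
theorem trA_fold_le_mem (rs : List (Int × Int × Int)) (a : Int) (r : Int × Int × Int)
    (hr : r ∈ rs) :
    rs.foldl (fun e r => if e ≥ r.2.2 then r.2.2 - 1 else e) a ≤ r.2.2 - 1 := by
  induction rs generalizing a with
  | nil => cases hr
  | cons x rs ih =>
      simp only [List.foldl_cons]
      rcases List.mem_cons.mp hr with h | h
      · subst h
        have := trA_fold_le_init rs (if a ≥ r.2.2 then r.2.2 - 1 else a)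
        by_cases hc : a ≥ r.2.2
        · simp only [if_pos hc] at this ⊢; omega
        · simp only [if_neg hc] at this ⊢; omega
      · exact ih _ h

-- A's fold result is bounded below by any common lower bound.
theorem trA_fold_ge (rs : List (Int × Int × Int)) (a c : Int)
    (hc : ∀ r ∈ rs, c ≤ r.2.2 - 1) (ha : c ≤ a) :
    c ≤ rs.foldl (fun e r => if e ≥ r.2.2 then r.2.2 - 1 else e) a := by
  induction rs generalizing a with
  | nil => simpa
  | cons x rs ih =>
      simp only [List.foldl_cons]
      refine ih _ (fun r hr => hc r (List.mem_cons_of_mem _ hr)) ?_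
      have := hc x (List.mem_cons_self)
      split_ifs <;> omega

-- A's fold equals min of the start and the smallest boundary minus one.
theorem trA_fold_eq_min (rs : List (Int × Int × Int)) (a : Int) (m : Int × Int × Int)
    (hm : m ∈ rs) (hmin : ∀ r ∈ rs, m.2.2 ≤ r.2.2) :
    rs.foldl (fun e r => if e ≥ r.2.2 then r.2.2 - 1 else e) a =
      if m.2.2 - 1 < a then m.2.2 - 1 else a := by
  have h1 := trA_fold_le_init rs a
  have h2 := trA_fold_le_mem rs a m hm
  have h3 := trA_fold_ge rs a (if m.2.2 - 1 < a then m.2.2 - 1 else a)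
    (fun r hr => by have := hmin r hr; split_ifs <;> omega)
    (by split_ifs <;> omega)
  split_ifs at h3 ⊢ <;> omega

-- ===== VERDICT =====
theorem trimRight_spec : Claim_equal_trimRight := by
  intro f rs _
  unfold Spec_trimRight trimRight trimRight_alt
  rcases hs : PySem.List.sorted rs (fun r => r.2.2) false with _ | ⟨m, t⟩
  · have hnil : rs = [] := (PySem.List.sorted_eq_nil_iff _ _ _).mp hs
    subst hnil; simp
  · have hmem : m ∈ rs := by
      have : m ∈ PySem.List.sorted rs (fun r => r.2.2) false := by
        rw [hs]; exact List.mem_cons_self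
      exact (PySem.List.mem_sorted _ _ _ _).mp this
    have hmin : ∀ r ∈ rs, m.2.2 ≤ r.2.2 :=
      PySem.List.key_head_sorted_le (xs := rs) (key := fun r => r.2.2) hs
    show (f.1, f.2.1, f.2.2.1,
        (if (rs.foldl (fun e r => if e ≥ r.2.2 then r.2.2 - 1 else e) f.2.2.2.1) < f.2.2.1
          then f.2.2.1 else rs.foldl (fun e r => if e ≥ r.2.2 then r.2.2 - 1 else e) f.2.2.2.1),
        f.2.2.2.2) = _
    rw [trA_fold_eq_min rs f.2.2.2.1 m hmem hmin]
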